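-- pv_equiv track=rewrite | github.com/cibermarcoa/GICIB_Dise-o_y_An-lisis_de_Algoritmos | vuelta_atras/luna/luna.py | laberinto
-- ===== SOURCE A (Python) =====
-- def esSolucion(countEnemigos, maxEnemigos):
--     return countEnemigos == maxEnemigos
--
-- def esFactible(tablero, x, y, n, m, turno, maxDistance):
--     if 0 <= x < m and 0 <= y < n and turno <= maxDistance:
--         return tablero[y][x] == 1 or tablero[y][x] == 0
--
-- def laberinto(tablero, esSol, n, m, countEnemigos, maxEnemigos, initx, inity, maxDistance, turno):
--     if esSolucion(countEnemigos, maxEnemigos):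
--         esSol = True
--     else:
--         posiciones = [[0, 1], [1, 0], [0, -1], [-1, 0]]
--         for dx, dy in posiciones:
--             if esFactible(tablero, initx + dx, inity + dy, n, m, turno, maxDistance):
--                 enemigos = []
--                 if tablero[inity + dy][initx + dx] == 1:
--                     countEnemigos += 1
--                     enemigos.append((inity + dy, initx + dx))
--                 tablero[inity + dy][initx + dx] = 2
--                 esSol = laberinto(tablero, esSol, n, m, countEnemigos, maxEnemigos, initx + dx, inity + dy, maxDistance, turno + 1)
--                 tablero[inity + dy][initx + dx] = 0
--                 for ey, ex in enemigos:
--                     tablero[ey][ex] = 1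
--     return esSol
-- ===== SOURCE B (Python) =====
-- def laberinto(tablero, esSol, n, m, countEnemigos, maxEnemigos, initx, inity, maxDistance, turno):
--     if esSol or countEnemigos == maxEnemigos:
--         return True
--
--     def explore(dirs, count):
--         if not dirs:
--             return False
--         (dx, dy), rest = dirs[0], dirs[1:]
--         x, y = initx + dx, inity + dy
--         if not (0 <= x < m and 0 <= y < n and turno <= maxDistance and tablero[y][x] in (0, 1)):
--             return explore(rest, count)
--         if tablero[y][x] == 1:
--             count += 1
--             restore = 1
--         else:
--             restore = 0
--         tablero[y][x] = 2
--         hit = laberinto(tablero, False, n, m, count, maxEnemigos, x, y, maxDistance, turno + 1)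
--         tablero[y][x] = restore
--         return hit or explore(rest, count)
--
--     return explore([(0, 1), (1, 0), (0, -1), (-1, 0)], countEnemigos)
-- ===== Notes on version B (the rewrite author's own statement) =====
-- stated objective: simpler
-- what changed: A threads a boolean accumulator esSol through the loop and every recursive call; B returns a boolean directly: early True when esSol holds or the enemy count is reached, a recursive helper over the remaining directions, and short-circuit 'hit or explore(rest)' with a single restore assignment instead of reassigning esSol each iteration.
-- outside the precondition, e.g. on laberinto([[0], [5]], False, 3, 1, 0, 1, 0, 0, 5, 0): A returns False, B returns False
import Mathlib
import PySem

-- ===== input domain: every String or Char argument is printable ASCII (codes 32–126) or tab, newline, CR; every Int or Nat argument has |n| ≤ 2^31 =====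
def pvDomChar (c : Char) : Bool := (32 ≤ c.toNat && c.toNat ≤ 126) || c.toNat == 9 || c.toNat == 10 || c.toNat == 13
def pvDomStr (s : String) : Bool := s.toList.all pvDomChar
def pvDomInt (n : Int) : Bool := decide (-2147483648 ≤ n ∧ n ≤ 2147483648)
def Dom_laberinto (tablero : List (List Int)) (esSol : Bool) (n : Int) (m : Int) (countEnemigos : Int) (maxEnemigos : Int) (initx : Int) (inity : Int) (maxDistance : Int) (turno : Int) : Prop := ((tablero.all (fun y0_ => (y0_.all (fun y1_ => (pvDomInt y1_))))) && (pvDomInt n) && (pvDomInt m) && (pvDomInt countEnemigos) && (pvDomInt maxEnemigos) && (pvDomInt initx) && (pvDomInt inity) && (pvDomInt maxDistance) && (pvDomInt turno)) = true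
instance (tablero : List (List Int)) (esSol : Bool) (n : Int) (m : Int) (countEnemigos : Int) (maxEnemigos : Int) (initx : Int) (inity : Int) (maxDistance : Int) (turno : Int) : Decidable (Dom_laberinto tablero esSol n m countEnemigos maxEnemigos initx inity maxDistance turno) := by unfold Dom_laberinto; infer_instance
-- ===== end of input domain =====

-- B replaces A's threaded esSol accumulator by a direct boolean: early True when esSol holds or the
-- enemy count is reached, a recursive helper over the direction list, and short-circuit
-- 'hit or explore(rest)' instead of reassigning esSol each loop iteration (objective: simpler).
-- Both Pythons temporarily mark cells of `tablero` in place but restore them before returning;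
-- the equivalence proved is about the return value (the net mutation is none for both).

-- ===== PORT A =====
-- tablero[y][x] (both Pythons touch it only at indices the bounds check admits; getD is exact there)
def pvCell (t : List (List Int)) (y x : Int) : Int := (t.getD y.toNat []).getD x.toNat 0
-- tablero[y][x] = v
def pvSetCell (t : List (List Int)) (y x v : Int) : List (List Int) :=
  t.set y.toNat ((t.getD y.toNat []).set x.toNat v)

def esFactible (t : List (List Int)) (x y n m turno maxDistance : Int) : Bool :=
  decide (0 ≤ x ∧ x < m ∧ 0 ≤ y ∧ y < n ∧ turno ≤ maxDistance) &&
    (pyCellIsPath t y x)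
where pyCellIsPath (t : List (List Int)) (y x : Int) : Bool :=
  pvCell t y x == 1 || pvCell t y x == 0

-- A, step for step; the recursion is made total with a fuel that the factibility guard
-- turno ≤ maxDistance keeps from ever running out (depth ≤ maxDistance - turno + 1).
-- State threaded through the for-loop: (tablero, esSol, countEnemigos).
def laberintoFuel : Nat → List (List Int) → Bool → Int → Int → Int → Int → Int → Int → Int → Int → List (List Int) × Bool
  | 0, t, s, _, _, cE, mE, _, _, _, _ => (t, if cE == mE then true else s)
  | f+1, t, s, n, m, cE, mE, ix, iy, mD, tn =>
    if cE == mE then (t, true)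
    else
      let r := [((0:Int), (1:Int)), (1, 0), (0, -1), (-1, 0)].foldl
        (fun (st : List (List Int) × Bool × Int) (d : Int × Int) =>
          let x := ix + d.1
          let y := iy + d.2
          if esFactible st.1 x y n m tn mD then
            let enemy := pvCell st.1 y x == 1
            let cE' := if enemy then st.2.2 + 1 else st.2.2
            let t2 := pvSetCell st.1 y x 2
            let res := laberintoFuel f t2 st.2.1 n m cE' mE x y mD (tn + 1)
            let t4 := pvSetCell res.1 y x 0
            let t5 := if enemy then pvSetCell t4 y x 1 else t4
            (t5, res.2, cE')
          else st)
        (t, s, cE)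
      (r.1, r.2.1)

def laberinto (tablero : List (List Int)) (esSol : Bool) (n : Int) (m : Int) (countEnemigos : Int) (maxEnemigos : Int) (initx : Int) (inity : Int) (maxDistance : Int) (turno : Int) : Bool :=
  (laberintoFuel ((maxDistance - turno).toNat + 1) tablero esSol n m countEnemigos maxEnemigos initx inity maxDistance turno).2

-- ===== PORT B =====
-- B, step for step (same fuel discipline): top-level early True, then the recursive helper
-- `explore` over the remaining directions with short-circuit or.
mutual
def laberintoAltFuel : Nat → List (List Int) → Bool → Int → Int → Int → Int → Int → Int → Int → Int → List (List Int) × Bool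
  | f, t, s, n, m, cE, mE, ix, iy, mD, tn =>
    if s || cE == mE then (t, true)
    else
      match f with
      | 0 => (t, false)
      | f+1 => exploreFuel f [((0:Int), (1:Int)), (1, 0), (0, -1), (-1, 0)] t cE n m mE ix iy mD tn
termination_by f _ _ _ _ _ _ _ _ _ _ => (f, 0)

def exploreFuel : Nat → List (Int × Int) → List (List Int) → Int → Int → Int → Int → Int → Int → Int → Int → List (List Int) × Bool
  | _, [], t, _, _, _, _, _, _, _, _ => (t, false)
  | f, d :: rest, t, count, n, m, mE, ix, iy, mD, tn =>
    let x := ix + d.1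
    let y := iy + d.2
    if !(decide (0 ≤ x ∧ x < m ∧ 0 ≤ y ∧ y < n ∧ tn ≤ mD) &&
          (pvCell t y x == 0 || pvCell t y x == 1)) then
      exploreFuel f rest t count n m mE ix iy mD tn
    else
      let enemy := pvCell t y x == 1
      let count' := if enemy then count + 1 else count
      let restore : Int := if enemy then 1 else 0
      let t2 := pvSetCell t y x 2
      let res := laberintoAltFuel f t2 false n m count' mE x y mD (tn + 1)
      let t5 := pvSetCell res.1 y x restore
      if res.2 then (t5, true) else exploreFuel f rest t5 count' n m mE ix iy mD tn
termination_by f ds _ _ _ _ _ _ _ _ _ => (f, ds.length + 1)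
end

def laberinto_alt (tablero : List (List Int)) (esSol : Bool) (n : Int) (m : Int) (countEnemigos : Int) (maxEnemigos : Int) (initx : Int) (inity : Int) (maxDistance : Int) (turno : Int) : Bool :=
  (laberintoAltFuel ((maxDistance - turno).toNat + 1) tablero esSol n m countEnemigos maxEnemigos initx inity maxDistance turno).2

-- ===== PRECONDITION & SPEC =====
-- Pre_ excludes inputs whose declared dimensions n, m overstate the actual board (unless the
-- search is vacuous: countEnemigos == maxEnemigos, turno > maxDistance, n ≤ 0 / m ≤ 0, or no
-- start neighbour lies in the declared rectangle), because on such boards Python A can raise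
-- IndexError when the search touches a missing cell.
def Pre_laberinto (tablero : List (List Int)) (esSol : Bool) (n : Int) (m : Int) (countEnemigos : Int) (maxEnemigos : Int) (initx : Int) (inity : Int) (maxDistance : Int) (turno : Int) : Prop :=
  countEnemigos = maxEnemigos ∨ maxDistance < turno ∨ n ≤ 0 ∨ m ≤ 0 ∨
    (n ≤ (tablero.length : Int) ∧ ∀ row ∈ tablero.take n.toNat, m ≤ (row.length : Int)) ∨
    (∀ d ∈ [((0:Int), (1:Int)), (1, 0), (0, -1), (-1, 0)],
      ¬ (0 ≤ initx + d.1 ∧ initx + d.1 < m ∧ 0 ≤ inity + d.2 ∧ inity + d.2 < n))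
instance (tablero : List (List Int)) (esSol : Bool) (n : Int) (m : Int) (countEnemigos : Int) (maxEnemigos : Int) (initx : Int) (inity : Int) (maxDistance : Int) (turno : Int) : Decidable (Pre_laberinto tablero esSol n m countEnemigos maxEnemigos initx inity maxDistance turno) := by unfold Pre_laberinto; infer_instance

def pvWitness_laberinto : List (List Int) × Bool × Int × Int × Int × Int × Int × Int × Int × Int :=
  ([[0, 0], [0, 1]], false, 2, 2, 0, 1, 0, 0, 3, 0)

def Spec_laberinto (tablero : List (List Int)) (esSol : Bool) (n : Int) (m : Int) (countEnemigos : Int) (maxEnemigos : Int) (initx : Int) (inity : Int) (maxDistance : Int) (turno : Int) (out : Bool) : Prop := out = laberinto_alt tablero esSol n m countEnemigos maxEnemigos initx inity maxDistance turno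
instance (tablero : List (List Int)) (esSol : Bool) (n : Int) (m : Int) (countEnemigos : Int) (maxEnemigos : Int) (initx : Int) (inity : Int) (maxDistance : Int) (turno : Int) (out : Bool) : Decidable (Spec_laberinto tablero esSol n m countEnemigos maxEnemigos initx inity maxDistance turno out) := by unfold Spec_laberinto; infer_instance

-- ===== CLAIM (what is proved, stated in full; the proofs are below) =====
def Claim_equal_laberinto : Prop := ∀ (tablero : List (List Int)) (esSol : Bool) (n : Int) (m : Int) (countEnemigos : Int) (maxEnemigos : Int) (initx : Int) (inity : Int) (maxDistance : Int) (turno : Int), Dom_laberinto tablero esSol n m countEnemigos maxEnemigos initx inity maxDistance turno → Pre_laberinto tablero esSol n m countEnemigos maxEnemigos initx inity maxDistance turno → Spec_laberinto tablero esSol n m countEnemigos maxEnemigos initx inity maxDistance turno (laberinto tablero esSol n m countEnemigos maxEnemigos initx inity maxDistance turno)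

-- ===== LEMMAS AND PROOFS =====

-- the body of A's for-loop as a named function (definitionally the lambda in laberintoFuel)
def stepA (f : Nat) (n m mE ix iy mD tn : Int) (st : List (List Int) × Bool × Int) (d : Int × Int) : List (List Int) × Bool × Int :=
  let x := ix + d.1
  let y := iy + d.2
  if esFactible st.1 x y n m tn mD then
    let enemy := pvCell st.1 y x == 1
    let cE' := if enemy then st.2.2 + 1 else st.2.2
    let t2 := pvSetCell st.1 y x 2
    let res := laberintoFuel f t2 st.2.1 n m cE' mE x y mD (tn + 1)
    let t4 := pvSetCell res.1 y x 0
    let t5 := if enemy then pvSetCell t4 y x 1 else t4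
    (t5, res.2, cE')
  else st

theorem laberintoFuel_succ (f : Nat) (t : List (List Int)) (s : Bool) (n m cE mE ix iy mD tn : Int) :
    laberintoFuel (f+1) t s n m cE mE ix iy mD tn =
      if cE == mE then (t, true)
      else
        let r := [((0:Int), (1:Int)), (1, 0), (0, -1), (-1, 0)].foldl (stepA f n m mE ix iy mD tn) (t, s, cE)
        (r.1, r.2.1) := rfl

theorem pvSetCell_pvSetCell (t : List (List Int)) (y x a b : Int) :
    pvSetCell (pvSetCell t y x a) y x b = pvSetCell t y x b := by
  unfold pvSetCell
  by_cases h : y.toNat < t.length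
  · simp [List.getD, h, List.set_set]
  · simp [List.set_eq_of_length_le (by omega : t.length ≤ y.toNat)]

-- B's inline factibility test equals A's esFactible
theorem fac_eq (t : List (List Int)) (x y n m tn mD : Int) :
    (decide (0 ≤ x ∧ x < m ∧ 0 ≤ y ∧ y < n ∧ tn ≤ mD) &&
      (pvCell t y x == 0 || pvCell t y x == 1)) = esFactible t x y n m tn mD := by
  unfold esFactible esFactible.pyCellIsPath
  cases decide (0 ≤ x ∧ x < m ∧ 0 ≤ y ∧ y < n ∧ tn ≤ mD) <;> simp [Bool.or_comm]

-- evaluation lemmas for one iteration of A's loop body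
theorem stepA_skip (f : Nat) (n m mE ix iy mD tn : Int) (t : List (List Int)) (s : Bool) (cEa : Int) (d : Int × Int)
    (hf : esFactible t (ix + d.1) (iy + d.2) n m tn mD = false) :
    stepA f n m mE ix iy mD tn (t, s, cEa) d = (t, s, cEa) := by
  unfold stepA
  rw [if_neg (by simp [hf])]

theorem stepA_enemy (f : Nat) (n m mE ix iy mD tn : Int) (t : List (List Int)) (s : Bool) (cEa : Int) (d : Int × Int)
    (hf : esFactible t (ix + d.1) (iy + d.2) n m tn mD = true)
    (he : (pvCell t (iy + d.2) (ix + d.1) == 1) = true) :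
    stepA f n m mE ix iy mD tn (t, s, cEa) d =
      (pvSetCell (pvSetCell (laberintoFuel f (pvSetCell t (iy + d.2) (ix + d.1) 2) s n m (cEa + 1) mE (ix + d.1) (iy + d.2) mD (tn + 1)).1 (iy + d.2) (ix + d.1) 0) (iy + d.2) (ix + d.1) 1,
       (laberintoFuel f (pvSetCell t (iy + d.2) (ix + d.1) 2) s n m (cEa + 1) mE (ix + d.1) (iy + d.2) mD (tn + 1)).2,
       cEa + 1) := by
  unfold stepA
  rw [if_pos hf]
  simp [he]

theorem stepA_free (f : Nat) (n m mE ix iy mD tn : Int) (t : List (List Int)) (s : Bool) (cEa : Int) (d : Int × Int)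
    (hf : esFactible t (ix + d.1) (iy + d.2) n m tn mD = true)
    (he : (pvCell t (iy + d.2) (ix + d.1) == 1) = false) :
    stepA f n m mE ix iy mD tn (t, s, cEa) d =
      (pvSetCell (laberintoFuel f (pvSetCell t (iy + d.2) (ix + d.1) 2) s n m cEa mE (ix + d.1) (iy + d.2) mD (tn + 1)).1 (iy + d.2) (ix + d.1) 0,
       (laberintoFuel f (pvSetCell t (iy + d.2) (ix + d.1) 2) s n m cEa mE (ix + d.1) (iy + d.2) mD (tn + 1)).2,
       cEa) := by
  unfold stepA
  rw [if_pos hf]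
  simp [he]

-- evaluation lemmas for one step of B's explore helper
theorem explore_skip (f : Nat) (d : Int × Int) (rest : List (Int × Int)) (t : List (List Int)) (cEa n m mE ix iy mD tn : Int)
    (hf : esFactible t (ix + d.1) (iy + d.2) n m tn mD = false) :
    exploreFuel f (d :: rest) t cEa n m mE ix iy mD tn = exploreFuel f rest t cEa n m mE ix iy mD tn := by
  rw [exploreFuel, fac_eq]
  simp [hf]

theorem explore_enemy (f : Nat) (d : Int × Int) (rest : List (Int × Int)) (t : List (List Int)) (cEa n m mE ix iy mD tn : Int)
    (hf : esFactible t (ix + d.1) (iy + d.2) n m tn mD = true)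
    (he : (pvCell t (iy + d.2) (ix + d.1) == 1) = true) :
    exploreFuel f (d :: rest) t cEa n m mE ix iy mD tn =
      (if (laberintoAltFuel f (pvSetCell t (iy + d.2) (ix + d.1) 2) false n m (cEa + 1) mE (ix + d.1) (iy + d.2) mD (tn + 1)).2
       then (pvSetCell (laberintoAltFuel f (pvSetCell t (iy + d.2) (ix + d.1) 2) false n m (cEa + 1) mE (ix + d.1) (iy + d.2) mD (tn + 1)).1 (iy + d.2) (ix + d.1) 1, true)
       else exploreFuel f rest (pvSetCell (laberintoAltFuel f (pvSetCell t (iy + d.2) (ix + d.1) 2) false n m (cEa + 1) mE (ix + d.1) (iy + d.2) mD (tn + 1)).1 (iy + d.2) (ix + d.1) 1) (cEa + 1) n m mE ix iy mD tn) := by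
  rw [exploreFuel, fac_eq]
  simp [hf, he]

theorem explore_free (f : Nat) (d : Int × Int) (rest : List (Int × Int)) (t : List (List Int)) (cEa n m mE ix iy mD tn : Int)
    (hf : esFactible t (ix + d.1) (iy + d.2) n m tn mD = true)
    (he : (pvCell t (iy + d.2) (ix + d.1) == 1) = false) :
    exploreFuel f (d :: rest) t cEa n m mE ix iy mD tn =
      (if (laberintoAltFuel f (pvSetCell t (iy + d.2) (ix + d.1) 2) false n m cEa mE (ix + d.1) (iy + d.2) mD (tn + 1)).2
       then (pvSetCell (laberintoAltFuel f (pvSetCell t (iy + d.2) (ix + d.1) 2) false n m cEa mE (ix + d.1) (iy + d.2) mD (tn + 1)).1 (iy + d.2) (ix + d.1) 0, true)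
       else exploreFuel f rest (pvSetCell (laberintoAltFuel f (pvSetCell t (iy + d.2) (ix + d.1) 2) false n m cEa mE (ix + d.1) (iy + d.2) mD (tn + 1)).1 (iy + d.2) (ix + d.1) 0) cEa n m mE ix iy mD tn) := by
  rw [exploreFuel, fac_eq]
  simp [hf, he]

-- A's result is true whenever the incoming esSol is true
theorem laberintoFuel_true (f : Nat) : ∀ (t : List (List Int)) (n m cE mE ix iy mD tn : Int),
    (laberintoFuel f t true n m cE mE ix iy mD tn).2 = true := by
  induction f with
  | zero =>
    intro t n m cE mE ix iy mD tn
    simp only [laberintoFuel]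
    by_cases h : cE == mE <;> simp [h]
  | succ f ih =>
    intro t n m cE mE ix iy mD tn
    rw [laberintoFuel_succ]
    by_cases h : cE == mE
    · simp [h]
    · rw [if_neg h]
      have loopTrue : ∀ (ds : List (Int × Int)) (st : List (List Int) × Bool × Int),
          st.2.1 = true → (ds.foldl (stepA f n m mE ix iy mD tn) st).2.1 = true := by
        intro ds
        induction ds with
        | nil => intro st hst; simpa using hst
        | cons d rest ihd =>
          intro st hst
          simp only [List.foldl_cons]
          apply ihd
          unfold stepA
          by_cases hf : esFactible st.1 (ix + d.1) (iy + d.2) n m tn mD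
          · simp only [hf, hst]
            exact ih _ _ _ _ _ _ _ _ _
          · simpa [hf] using hst
      exact loopTrue _ (t, true, cE) rfl

-- the foldl of A's loop keeps a true flag true
theorem loopA_true (f : Nat) (n m mE ix iy mD tn : Int) :
    ∀ (ds : List (Int × Int)) (st : List (List Int) × Bool × Int),
      st.2.1 = true → (ds.foldl (stepA f n m mE ix iy mD tn) st).2.1 = true := by
  intro ds
  induction ds with
  | nil => intro st hst; simpa using hst
  | cons d rest ihd =>
    intro st hst
    simp only [List.foldl_cons]
    apply ihd
    unfold stepA
    by_cases hf : esFactible st.1 (ix + d.1) (iy + d.2) n m tn mD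
    · simp only [hf, hst]
      exact laberintoFuel_true f _ _ _ _ _ _ _ _ _
    · simpa [hf] using hst

-- main invariant: for every fuel, same result flag, and same board whenever the flag is false
theorem laberintoFuel_eq_alt (f : Nat) : ∀ (t : List (List Int)) (s : Bool) (n m cE mE ix iy mD tn : Int),
    (laberintoFuel f t s n m cE mE ix iy mD tn).2 = (laberintoAltFuel f t s n m cE mE ix iy mD tn).2 ∧
    ((laberintoFuel f t s n m cE mE ix iy mD tn).2 = false →
      (laberintoFuel f t s n m cE mE ix iy mD tn).1 = (laberintoAltFuel f t s n m cE mE ix iy mD tn).1) := by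
  induction f with
  | zero =>
    intro t s n m cE mE ix iy mD tn
    rw [laberintoAltFuel]
    simp only [laberintoFuel]
    by_cases h : cE == mE
    · simp [h]
    · cases s <;> simp [h]
  | succ f ih =>
    intro t s n m cE mE ix iy mD tn
    have hB0 : laberintoAltFuel (f+1) t s n m cE mE ix iy mD tn =
        if s || cE == mE then (t, true)
        else exploreFuel f [((0:Int), (1:Int)), (1, 0), (0, -1), (-1, 0)] t cE n m mE ix iy mD tn := by
      rw [laberintoAltFuel]
    by_cases h : cE == mE
    · have hA : laberintoFuel (f+1) t s n m cE mE ix iy mD tn = (t, true) := by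
        rw [laberintoFuel_succ, if_pos h]
      rw [hA, hB0, if_pos (by simp [h])]
      simp
    · cases s with
      | true =>
        rw [hB0, if_pos (by simp)]
        have hA := laberintoFuel_true (f+1) t n m cE mE ix iy mD tn
        refine ⟨hA, fun hfalse => ?_⟩
        rw [hfalse] at hA
        exact Bool.noConfusion hA
      | false =>
        rw [hB0, if_neg (by simp [h]), laberintoFuel_succ, if_neg h]
        simp only []
        have loopEq : ∀ (ds : List (Int × Int)) (t : List (List Int)) (cE : Int),
            ((ds.foldl (stepA f n m mE ix iy mD tn) (t, false, cE)).2.1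
              = (exploreFuel f ds t cE n m mE ix iy mD tn).2) ∧
            ((ds.foldl (stepA f n m mE ix iy mD tn) (t, false, cE)).2.1 = false →
              (ds.foldl (stepA f n m mE ix iy mD tn) (t, false, cE)).1
                = (exploreFuel f ds t cE n m mE ix iy mD tn).1) := by
          intro ds
          induction ds with
          | nil => intro t cE; rw [exploreFuel]; simp
          | cons d rest ihd =>
            intro t cE
            by_cases hf : esFactible t (ix + d.1) (iy + d.2) n m tn mD
            · by_cases he : pvCell t (iy + d.2) (ix + d.1) == 1
              · -- enemy cell: count increments, restore value is 1
                rw [List.foldl_cons, stepA_enemy f n m mE ix iy mD tn t false cE d hf he,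
                    explore_enemy f d rest t cE n m mE ix iy mD tn hf he]
                obtain ⟨hres2, hres1⟩ := ih (pvSetCell t (iy + d.2) (ix + d.1) 2) false n m
                  (cE + 1) mE (ix + d.1) (iy + d.2) mD (tn + 1)
                by_cases hhit : (laberintoFuel f (pvSetCell t (iy + d.2) (ix + d.1) 2) false n m
                    (cE + 1) mE (ix + d.1) (iy + d.2) mD (tn + 1)).2
                · have hBtrue : (laberintoAltFuel f (pvSetCell t (iy + d.2) (ix + d.1) 2) false n m
                      (cE + 1) mE (ix + d.1) (iy + d.2) mD (tn + 1)).2 = true := by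
                    rw [← hres2]; exact hhit
                  rw [hhit, hBtrue, if_pos rfl]
                  have hL := loopA_true f n m mE ix iy mD tn rest
                    (pvSetCell (pvSetCell (laberintoFuel f (pvSetCell t (iy + d.2) (ix + d.1) 2) false n m
                      (cE + 1) mE (ix + d.1) (iy + d.2) mD (tn + 1)).1 (iy + d.2) (ix + d.1) 0) (iy + d.2) (ix + d.1) 1, true, cE + 1) rfl
                  refine ⟨by rw [hL], fun hfalse => ?_⟩
                  rw [hL] at hfalse
                  exact Bool.noConfusion hfalse
                · have hA2 : (laberintoFuel f (pvSetCell t (iy + d.2) (ix + d.1) 2) false n m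
                      (cE + 1) mE (ix + d.1) (iy + d.2) mD (tn + 1)).2 = false := by
                    simpa using hhit
                  have hB2 : (laberintoAltFuel f (pvSetCell t (iy + d.2) (ix + d.1) 2) false n m
                      (cE + 1) mE (ix + d.1) (iy + d.2) mD (tn + 1)).2 = false := by
                    rw [← hres2]; exact hA2
                  rw [hA2, hB2, if_neg (by simp), hres1 hA2, pvSetCell_pvSetCell]
                  exact ihd _ _
              · -- free cell: count unchanged, restore value is 0
                have he' : (pvCell t (iy + d.2) (ix + d.1) == 1) = false := by simpa using he
                rw [List.foldl_cons, stepA_free f n m mE ix iy mD tn t false cE d hf he',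
                    explore_free f d rest t cE n m mE ix iy mD tn hf he']
                obtain ⟨hres2, hres1⟩ := ih (pvSetCell t (iy + d.2) (ix + d.1) 2) false n m
                  cE mE (ix + d.1) (iy + d.2) mD (tn + 1)
                by_cases hhit : (laberintoFuel f (pvSetCell t (iy + d.2) (ix + d.1) 2) false n m
                    cE mE (ix + d.1) (iy + d.2) mD (tn + 1)).2
                · have hBtrue : (laberintoAltFuel f (pvSetCell t (iy + d.2) (ix + d.1) 2) false n m
                      cE mE (ix + d.1) (iy + d.2) mD (tn + 1)).2 = true := by
                    rw [← hres2]; exact hhit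
                  rw [hhit, hBtrue, if_pos rfl]
                  have hL := loopA_true f n m mE ix iy mD tn rest
                    (pvSetCell (laberintoFuel f (pvSetCell t (iy + d.2) (ix + d.1) 2) false n m
                      cE mE (ix + d.1) (iy + d.2) mD (tn + 1)).1 (iy + d.2) (ix + d.1) 0, true, cE) rfl
                  refine ⟨by rw [hL], fun hfalse => ?_⟩
                  rw [hL] at hfalse
                  exact Bool.noConfusion hfalse
                · have hA2 : (laberintoFuel f (pvSetCell t (iy + d.2) (ix + d.1) 2) false n m
                      cE mE (ix + d.1) (iy + d.2) mD (tn + 1)).2 = false := by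
                    simpa using hhit
                  have hB2 : (laberintoAltFuel f (pvSetCell t (iy + d.2) (ix + d.1) 2) false n m
                      cE mE (ix + d.1) (iy + d.2) mD (tn + 1)).2 = false := by
                    rw [← hres2]; exact hA2
                  rw [hA2, hB2, if_neg (by simp), hres1 hA2]
                  exact ihd _ _
            · -- not factible: both skip
              have hf' : esFactible t (ix + d.1) (iy + d.2) n m tn mD = false := by
                simpa using hf
              rw [List.foldl_cons, stepA_skip f n m mE ix iy mD tn t false cE d hf',
                  explore_skip f d rest t cE n m mE ix iy mD tn hf']
              exact ihd t cE
        exact loopEq _ t cE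

-- ===== VERDICT (by name: the statement is the Claim_ definition above) =====
theorem laberinto_spec : Claim_equal_laberinto := by
  intro tablero esSol n m cE mE ix iy mD tn _ _
  unfold Spec_laberinto laberinto laberinto_alt
  exact (laberintoFuel_eq_alt _ tablero esSol n m cE mE ix iy mD tn).1
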